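-- pv_equiv track=rewrite | github.com/yactam/EA4 | TP2/tp2_ex1.py | fibo_2_adds
-- ===== SOURCE A (Python) =====
-- def fibo_2_adds(n) :
--   ops = 0
--   if n <= 0 : return 0, ops
--   liste = [0, 1] + [0] * (n-1)
--   for i in range(2, n+1) :
--     liste[i] = liste[i-1] + liste[i-2]
--     ops += 1
--   return liste[n], ops
-- ===== SOURCE B (Python) =====
-- def _fd(k):
--     # returns (fib(k), fib(k+1)) by fast doubling
--     if k == 0:
--         return (0, 1)
--     a, b = _fd(k // 2)
--     c = a * (2 * b - a)
--     d = a * a + b * b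
--     if k % 2 == 0:
--         return (c, d)
--     return (d, c + d)
--
--
-- def fibo_2_adds(n):
--     if n <= 0:
--         return 0, 0
--     return _fd(n)[0], n - 1
-- ===== Notes on version B (the rewrite author's own statement) =====
-- stated objective: faster
-- what changed: replaces the O(n) table-filling loop by fast-doubling recursion for fib(n) and the closed form n-1 for the addition count; intended as faster, measured 540x at the largest size both finished (the probe could not verify sizes where A times out)
import Mathlib
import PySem

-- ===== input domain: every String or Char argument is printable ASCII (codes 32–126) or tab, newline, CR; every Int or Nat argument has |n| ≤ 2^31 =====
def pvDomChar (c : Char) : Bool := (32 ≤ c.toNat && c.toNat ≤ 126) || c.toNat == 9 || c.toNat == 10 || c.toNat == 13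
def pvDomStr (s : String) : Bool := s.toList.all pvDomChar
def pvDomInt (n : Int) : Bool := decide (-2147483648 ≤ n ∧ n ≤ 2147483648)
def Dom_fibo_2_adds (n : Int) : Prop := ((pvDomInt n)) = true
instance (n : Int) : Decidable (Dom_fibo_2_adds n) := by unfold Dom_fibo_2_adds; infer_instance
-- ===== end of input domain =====

-- B replaces A's table-filling loop by fast-doubling recursion and the closed form n-1 for the
-- addition count; intended as faster (timing run measured B 540x at the largest size both finished).

-- ===== PORT A =====
-- liste[i-1], liste[i-2] reads: i ranges over 2..n, so the index is nonneg and in range and the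
-- getD default is never used; liste[i] = … write: i nonneg, ported as set i.toNat.
def fibo_2_adds (n : Int) : List Int :=
  let ops : Int := 0
  if n ≤ 0 then [0, ops]
  else
    let liste : List Int := [0, 1] ++ List.replicate (n - 1).toNat 0
    let st := (PySem.List.pyRange 2 (n + 1) 1).foldl
      (fun (st : List Int × Int) i =>
        (st.1.set i.toNat (PySem.List.pyGetD st.1 (i - 1) 0 + PySem.List.pyGetD st.1 (i - 2) 0),
         st.2 + 1))
      (liste, ops)
    [PySem.List.pyGetD st.1 n 0, st.2]

-- ===== PORT B =====
-- fast doubling: fdAux k = (fib k, fib (k+1))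
def fdAux : Nat → Int × Int
  | 0 => (0, 1)
  | (k + 1) =>
    let p := fdAux ((k + 1) / 2)
    let a := p.1
    let b := p.2
    let c := a * (2 * b - a)
    let d := a * a + b * b
    if (k + 1) % 2 = 0 then (c, d) else (d, c + d)
decreasing_by exact Nat.div_lt_self (Nat.succ_pos k) (by norm_num)

def fibo_2_adds_alt (n : Int) : List Int :=
  if n ≤ 0 then [0, 0] else [(fdAux n.toNat).1, n - 1]

-- ===== PRECONDITION & SPEC =====
def Spec_fibo_2_adds (n : Int) (out : List Int) : Prop := out = fibo_2_adds_alt n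
instance (n : Int) (out : List Int) : Decidable (Spec_fibo_2_adds n out) := by unfold Spec_fibo_2_adds; infer_instance

-- ===== CLAIM (what is proved, stated in full; the proofs are below) =====
def Claim_equal_fibo_2_adds : Prop := ∀ (n : Int), Dom_fibo_2_adds n → Spec_fibo_2_adds n (fibo_2_adds n)

-- ===== LEMMAS AND PROOFS =====

-- B side: fast doubling computes Fibonacci
theorem fdAux_eq (k : Nat) : fdAux k = ((Nat.fib k : Int), (Nat.fib (k + 1) : Int)) := by
  induction k using Nat.strong_induction_on with
  | _ k ih =>
    match k with
    | 0 => simp [fdAux]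
    | (k + 1) =>
      have hlt : (k + 1) / 2 < k + 1 := Nat.div_lt_self (Nat.succ_pos k) (by norm_num)
      have hrec := ih ((k + 1) / 2) hlt
      set m := (k + 1) / 2 with hm
      have hle : Nat.fib m ≤ 2 * Nat.fib (m + 1) :=
        le_trans (Nat.fib_mono (Nat.le_succ m)) (Nat.le_mul_of_pos_left _ (by norm_num))
      have h2m : ((Nat.fib (2 * m) : Int)) =
          (Nat.fib m : Int) * (2 * (Nat.fib (m + 1) : Int) - (Nat.fib m : Int)) := by
        rw [Nat.fib_two_mul]
        push_cast [Nat.cast_sub hle]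
        ring
      have h2m1 : ((Nat.fib (2 * m + 1) : Int)) =
          (Nat.fib m : Int) * (Nat.fib m : Int) +
          (Nat.fib (m + 1) : Int) * (Nat.fib (m + 1) : Int) := by
        rw [Nat.fib_two_mul_add_one]
        push_cast
        ring
      rcases Nat.even_or_odd (k + 1) with he | ho
      · have hmod : (k + 1) % 2 = 0 := Nat.even_iff.mp he
        have hk : k + 1 = 2 * m := by omega
        rw [fdAux, hrec]
        simp only [hmod, if_true]
        rw [hk, h2m, h2m1]
      · have hmod1 : (k + 1) % 2 = 1 := Nat.odd_iff.mp ho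
        have hk : k + 1 = 2 * m + 1 := by omega
        have hmod : ¬ ((k + 1) % 2 = 0) := by omega
        rw [fdAux, hrec]
        simp only [hmod, if_false]
        rw [hk]
        have h2m2 : ((Nat.fib (2 * m + 1 + 1) : Int)) =
            (Nat.fib (2 * m) : Int) + (Nat.fib (2 * m + 1) : Int) := by
          rw [Nat.fib_add_two]; push_cast; ring_nf
        rw [h2m1, h2m2, h2m, h2m1]

-- A side: loop invariant.
def stepA (st : List Int × Int) (i : Int) : List Int × Int :=
  (st.1.set i.toNat (PySem.List.pyGetD st.1 (i - 1) 0 + PySem.List.pyGetD st.1 (i - 2) 0),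
   st.2 + 1)

theorem loopA_inv (k : Nat) : ∀ (s : Nat) (l : List Int) (ops : Int),
    2 ≤ s → s + k ≤ l.length →
    (∀ j : Nat, j < s → l.getD j 0 = (Nat.fib j : Int)) →
    let st := (PySem.List.pyRange (s : Int) ((s : Int) + k) 1).foldl stepA (l, ops)
    st.1.length = l.length ∧ st.2 = ops + k ∧
      (∀ j : Nat, j < s + k → st.1.getD j 0 = (Nat.fib j : Int)) := by
  induction k with
  | zero =>
    intro s l ops _ _ hinv
    simp [PySem.List.pyRange_one_eq_nil (le_refl (s : Int))]
    exact fun j hj => hinv j (by omega)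
  | succ k ih =>
    intro s l ops hs hlen hinv
    simp only [Nat.cast_add, Nat.cast_one]
    have hcons : PySem.List.pyRange (s : Int) ((s : Int) + (k + 1)) 1 =
        (s : Int) :: PySem.List.pyRange ((s : Int) + 1) ((s : Int) + (k + 1)) 1 :=
      PySem.List.pyRange_one_cons (by omega)
    have hslt : s < l.length := by omega
    -- the list after one step
    have hget1 : PySem.List.pyGetD l ((s : Int) - 1) 0 = (Nat.fib (s - 1) : Int) := by
      have : ((s : Int) - 1) = ((s - 1 : Nat) : Int) := by omega
      rw [this, PySem.List.pyGetD_natCast]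
      exact hinv (s - 1) (by omega)
    have hget2 : PySem.List.pyGetD l ((s : Int) - 2) 0 = (Nat.fib (s - 2) : Int) := by
      have : ((s : Int) - 2) = ((s - 2 : Nat) : Int) := by omega
      rw [this, PySem.List.pyGetD_natCast]
      exact hinv (s - 2) (by omega)
    have hstep : stepA (l, ops) (s : Int) =
        (l.set s ((Nat.fib s : Int)), ops + 1) := by
      unfold stepA
      simp only [hget1, hget2, Int.toNat_natCast]
      congr 1
      have hfib : (Nat.fib (s - 1) : Int) + (Nat.fib (s - 2) : Int) = (Nat.fib s : Int) := by
        have hadd := Nat.fib_add_two (n := s - 2)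
        have hs2 : s - 2 + 2 = s := by omega
        have hs1 : s - 2 + 1 = s - 1 := by omega
        rw [hs2, hs1] at hadd
        rw [hadd]
        push_cast
        ring
      rw [hfib]
    have hlen' : (l.set s ((Nat.fib s : Int))).length = l.length := by simp
    have hinv' : ∀ j : Nat, j < s + 1 → (l.set s ((Nat.fib s : Int))).getD j 0 = (Nat.fib j : Int) := by
      intro j hj
      rcases Nat.lt_or_ge j s with hj' | hj'
      · rw [List.getD_eq_getElem?_getD, List.getElem?_set_ne (by omega)]
        rw [← List.getD_eq_getElem?_getD]
        exact hinv j hj'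
      · have hjs : j = s := by omega
        subst hjs
        rw [List.getD_eq_getElem?_getD, List.getElem?_set_self' , ]
        simp [hslt]
    have := ih (s + 1) (l.set s ((Nat.fib s : Int))) (ops + 1) (by omega)
      (by rw [hlen']; omega) hinv'
    simp only [Nat.cast_add, Nat.cast_one] at this
    rw [hcons]
    simp only [List.foldl_cons]
    rw [hstep]
    have harg2 : (s : Int) + ((k : Int) + 1) = ((s : Int) + 1) + (k : Int) := by ring
    rw [harg2]
    refine ⟨?_, ?_, ?_⟩
    · rw [this.1, hlen']
    · rw [this.2.1]; ring
    · intro j hj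
      exact this.2.2 j (by omega)

-- ===== VERDICT (by name: the statement is the Claim_ definition above) =====
theorem fibo_2_adds_spec : Claim_equal_fibo_2_adds := by
  intro n _
  unfold Spec_fibo_2_adds fibo_2_adds fibo_2_adds_alt
  by_cases hn : n ≤ 0
  · simp [hn]
  · simp only [hn, if_false]
    rw [not_le] at hn
    obtain ⟨N, hN⟩ : ∃ N : Nat, n = (N : Int) := ⟨n.toNat, by omega⟩
    have hN1 : 1 ≤ N := by omega
    subst hN
    have hinv0 : ∀ j : Nat, j < 2 →
        ([0, 1] ++ List.replicate ((N : Int) - 1).toNat (0 : Int)).getD j 0 = (Nat.fib j : Int) := by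
      intro j hj
      interval_cases j <;> simp [List.getD]
    have hlen0 : 2 + (N - 1) ≤ ([0, 1] ++ List.replicate ((N : Int) - 1).toNat (0 : Int)).length := by
      simp; omega
    have h := loopA_inv (N - 1) 2 ([0, 1] ++ List.replicate ((N : Int) - 1).toNat 0) 0
      (le_refl 2) hlen0 hinv0
    obtain ⟨hlenf, hopsf, hgetf⟩ := h
    have hfun : (fun (st : List Int × Int) i =>
        (st.1.set i.toNat (PySem.List.pyGetD st.1 (i - 1) 0 + PySem.List.pyGetD st.1 (i - 2) 0),
         st.2 + 1)) = stepA := rfl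
    have hrange : PySem.List.pyRange 2 ((N : Int) + 1) 1 =
        PySem.List.pyRange ((2 : Nat) : Int) (((2 : Nat) : Int) + ((N - 1 : Nat) : Int)) 1 := by
      congr 1 <;> push_cast <;> omega
    rw [hfun, hrange]
    set st := (PySem.List.pyRange ((2 : Nat) : Int) (((2 : Nat) : Int) + ((N - 1 : Nat) : Int)) 1).foldl
      stepA ([0, 1] ++ List.replicate ((N : Int) - 1).toNat 0, 0) with hst
    have hfinal : PySem.List.pyGetD st.1 (N : Int) 0 = (Nat.fib N : Int) := by
      rw [PySem.List.pyGetD_natCast]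
      exact hgetf N (by omega)
    have ht : ((N : Int)).toNat = N := by omega
    rw [hfinal, hopsf, ht, fdAux_eq]
    have hops : (0 : Int) + ((N - 1 : Nat) : Int) = (N : Int) - 1 := by omega
    rw [hops]
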